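-- pv_equiv track=rewrite | github.com/daivikvennela/xlToPptx | lease_population/core.py | _detect_owner_type
-- ===== SOURCE A (Python) =====
-- def _detect_owner_type(mapping: dict) -> str:
--     """
--     Detect the owner type from the mapping based on available fields.
--     Priority: [Owner Type] > [Grantor Type] > [Grantee Type] > default to 'individual'
--     """
--     # Check for explicit owner type
--     for key in ['[Owner Type]', '[Grantor Type]', '[Grantee Type]']:
--         if key in mapping and mapping[key].strip():
--             owner_type = mapping[key].strip().lower()
--
--             # Map variations to standard types
--             if owner_type in ['individual', 'person']:
--                 return 'individual'
--             elif owner_type in ['entity', 'corporation', 'corp']: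
--                 return 'corporation'
--             elif owner_type in ['llc', 'limited liability company']:
--                 return 'llc'
--             elif owner_type in ['lp', 'limited partnership']:
--                 return 'lp'
--             elif owner_type in ['married couple', 'couple']:
--                 return 'married_couple'
--             elif owner_type in ['sole owner married couple', 'sole owner, married couple']:
--                 return 'Sole owner, married couple'
--             else:
--                 # Return the original value for any other type
--                 return mapping[key].strip()
--
--     # Default to individual if no type detected
--     return 'individual'
-- ===== SOURCE B (Python) =====
-- _PRIORITY = {'[Owner Type]': 0, '[Grantor Type]': 1, '[Grantee Type]': 2}
--
-- _CANONICAL = {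
--     'individual': 'individual',
--     'person': 'individual',
--     'entity': 'corporation',
--     'corporation': 'corporation',
--     'corp': 'corporation',
--     'llc': 'llc',
--     'limited liability company': 'llc',
--     'lp': 'lp',
--     'limited partnership': 'lp',
--     'married couple': 'married_couple',
--     'couple': 'married_couple',
--     'sole owner married couple': 'Sole owner, married couple',
--     'sole owner, married couple': 'Sole owner, married couple',
-- }
--
-- def _detect_owner_type(mapping: dict) -> str:
--     # Single pass over the mapping's items: keep the non-empty stripped value
--     # with the best (lowest) priority rank, then normalize via the table.
--     best = None  # (rank, stripped value)
--     for key, value in mapping.items():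
--         rank = _PRIORITY.get(key)
--         if rank is not None and (best is None or rank < best[0]):
--             raw = value.strip()
--             if raw:
--                 best = (rank, raw)
--     if best is None:
--         return 'individual'
--     raw = best[1]
--     return _CANONICAL.get(raw.lower(), raw)
-- ===== Notes on version B (the rewrite author's own statement) =====
-- stated objective: alternative
-- what changed: Instead of probing the dict with three priority keys and an if/elif cascade, B makes one pass over the mapping's items keeping the non-empty value with the lowest priority rank, then normalizes it through a canonical-type table.
import Mathlib
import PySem

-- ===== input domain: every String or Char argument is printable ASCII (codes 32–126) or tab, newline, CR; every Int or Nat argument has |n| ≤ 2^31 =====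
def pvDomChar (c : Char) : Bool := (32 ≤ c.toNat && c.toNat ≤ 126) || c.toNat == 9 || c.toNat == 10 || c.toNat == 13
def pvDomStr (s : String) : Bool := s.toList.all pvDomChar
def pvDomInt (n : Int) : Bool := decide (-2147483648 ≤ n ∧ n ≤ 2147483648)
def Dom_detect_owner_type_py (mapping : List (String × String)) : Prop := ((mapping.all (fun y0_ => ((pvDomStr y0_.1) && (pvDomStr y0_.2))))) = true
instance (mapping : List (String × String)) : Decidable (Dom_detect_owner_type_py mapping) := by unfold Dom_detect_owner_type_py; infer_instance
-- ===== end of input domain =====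

-- B replaces A's three-key probe + if/elif cascade by a single pass over the mapping's
-- items keeping the non-empty value of lowest priority rank, normalized via a table.


-- ===== PORT A =====
-- A's if/elif cascade on the lowered stripped value (orig is mapping[key].strip(), the fallback)
def detectCascadeA (owner_type orig : String) : String :=
  if owner_type = "individual" ∨ owner_type = "person" then "individual"
  else if owner_type = "entity" ∨ owner_type = "corporation" ∨ owner_type = "corp" then "corporation"
  else if owner_type = "llc" ∨ owner_type = "limited liability company" then "llc"
  else if owner_type = "lp" ∨ owner_type = "limited partnership" then "lp"
  else if owner_type = "married couple" ∨ owner_type = "couple" then "married_couple"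
  else if owner_type = "sole owner married couple" ∨ owner_type = "sole owner, married couple" then "Sole owner, married couple"
  else orig

-- A's for-loop over the three priority keys
def detectLoopA (mapping : List (String × String)) : List String → String
  | [] => "individual"
  | k :: ks =>
    match (PySem.Dict.mk mapping).get? k with
    | some v =>
      if PySem.Str.strip v ≠ "" then
        detectCascadeA (PySem.Str.lower (PySem.Str.strip v)) (PySem.Str.strip v)
      else detectLoopA mapping ks
    | none => detectLoopA mapping ks

def detect_owner_type_py (mapping : List (String × String)) : String :=
  detectLoopA mapping ["[Owner Type]", "[Grantor Type]", "[Grantee Type]"]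

-- ===== PORT B =====
def priorityB : PySem.Dict String Int :=
  PySem.Dict.mk [("[Owner Type]", 0), ("[Grantor Type]", 1), ("[Grantee Type]", 2)]

def canonicalB : PySem.Dict String String := PySem.Dict.mk
  [("individual", "individual"), ("person", "individual"),
   ("entity", "corporation"), ("corporation", "corporation"), ("corp", "corporation"),
   ("llc", "llc"), ("limited liability company", "llc"),
   ("lp", "lp"), ("limited partnership", "lp"),
   ("married couple", "married_couple"), ("couple", "married_couple"),
   ("sole owner married couple", "Sole owner, married couple"),
   ("sole owner, married couple", "Sole owner, married couple")]

-- Source B's loop body: keep the non-empty stripped value with the lowest rank seen so far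
def stepB (best : Option (Int × String)) (kv : String × String) : Option (Int × String) :=
  match priorityB.get? kv.1 with
  | none => best
  | some r =>
    if (match best with | none => true | some b => decide (r < b.1)) = true then
      let raw := PySem.Str.strip kv.2
      if raw ≠ "" then some (r, raw) else best
    else best

def detect_owner_type_py_alt (mapping : List (String × String)) : String :=
  match mapping.foldl stepB none with
  | none => "individual"
  | some b => canonicalB.getD (PySem.Str.lower b.2) b.2

-- ===== PRECONDITION & SPEC =====
-- Pre_ requires each of the three priority keys to occur at most once, as is automatic
-- for the Python argument (a dict); a duplicated priority key cannot arise from a dict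
-- and the assoc-list encodings of A and B resolve such duplicates differently.
def Pre_detect_owner_type_py (mapping : List (String × String)) : Prop :=
  (mapping.map Prod.fst).count "[Owner Type]" ≤ 1 ∧
  (mapping.map Prod.fst).count "[Grantor Type]" ≤ 1 ∧
  (mapping.map Prod.fst).count "[Grantee Type]" ≤ 1
instance (mapping : List (String × String)) : Decidable (Pre_detect_owner_type_py mapping) := by unfold Pre_detect_owner_type_py; infer_instance

def pvWitness_detect_owner_type_py : (List (String × String)) :=
  [("[Owner Type]", " Corp "), ("[Grantee Type]", "llc")]

def Spec_detect_owner_type_py (mapping : List (String × String)) (out : String) : Prop := out = detect_owner_type_py_alt mapping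
instance (mapping : List (String × String)) (out : String) : Decidable (Spec_detect_owner_type_py mapping out) := by unfold Spec_detect_owner_type_py; infer_instance

-- ===== CLAIM (what is proved, stated in full; the proofs are below) =====
def Claim_equal_detect_owner_type_py : Prop := ∀ (mapping : List (String × String)), Dom_detect_owner_type_py mapping → Pre_detect_owner_type_py mapping → Spec_detect_owner_type_py mapping (detect_owner_type_py mapping)

-- ===== LEMMAS AND PROOFS =====

-- first-key-wins merge of two candidates (earlier candidate wins ties)
def mergeB : Option (Int × String) → Option (Int × String) → Option (Int × String)
  | b, none => b
  | none, some s => some s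
  | some b, some s => if s.1 < b.1 then some s else some b

-- the "candidate" a single key contributes: its stripped value when present and non-empty
def candB (mapping : List (String × String)) (k : String) : Option String :=
  match (PySem.Dict.mk mapping).get? k with
  | some v => if PySem.Str.strip v ≠ "" then some (PySem.Str.strip v) else none
  | none => none

-- the fold's specified result from the three candidates
def specB (s0 s1 s2 : Option String) : Option (Int × String) :=
  match s0 with
  | some r => some (0, r)
  | none => match s1 with
    | some r => some (1, r)
    | none => match s2 with
      | some r => some (2, r)
      | none => none

theorem stepB_merge (b x : Option (Int × String)) (hd : String × String) :
    mergeB (stepB b hd) x = mergeB b (mergeB (stepB none hd) x) := by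
  unfold stepB
  cases hp : priorityB.get? hd.1 with
  | none => cases b <;> cases x <;> rfl
  | some r =>
    cases b with
    | none =>
      cases x with
      | none => by_cases hraw : PySem.Str.strip hd.2 = "" <;> simp [hraw, mergeB]
      | some s => by_cases hraw : PySem.Str.strip hd.2 = "" <;> simp [hraw, mergeB] <;> split_ifs <;> simp [mergeB]
    | some bb =>
      cases x with
      | none =>
        by_cases hraw : PySem.Str.strip hd.2 = "" <;> by_cases hlt : r < bb.1 <;>
          simp [hraw, hlt, mergeB]
      | some s =>
        by_cases hraw : PySem.Str.strip hd.2 = "" <;> by_cases hlt : r < bb.1 <;>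
          by_cases hsb : s.1 < bb.1 <;> by_cases hsr : s.1 < r <;>
          simp [hraw, hlt, hsb, hsr, mergeB] <;> omega

theorem foldl_stepB_merge (m : List (String × String)) (b : Option (Int × String)) :
    m.foldl stepB b = mergeB b (m.foldl stepB none) := by
  induction m generalizing b with
  | nil => cases b <;> rfl
  | cons hd tl ih =>
    simp only [List.foldl_cons]
    rw [ih (stepB b hd), ih (stepB none hd), stepB_merge]

theorem candB_cons_ne (hd : String × String) (tl : List (String × String)) (k : String)
    (h : hd.1 ≠ k) : candB (hd :: tl) k = candB tl k := by
  obtain ⟨a, v⟩ := hd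
  simp only [candB, PySem.Dict.get?_mk_cons]
  simp_all [beq_eq_false_iff_ne]

theorem candB_none_of_not_mem (m : List (String × String)) (k : String)
    (h : k ∉ m.map Prod.fst) : candB m k = none := by
  induction m with
  | nil => rfl
  | cons hd tl ih =>
    simp only [List.map_cons, List.mem_cons, not_or] at h
    rw [candB_cons_ne hd tl k (fun he => h.1 he.symm)]
    exact ih h.2

-- key lemma: under Pre_, the single pass computes the priority-ordered candidate choice
theorem foldl_stepB_spec (m : List (String × String)) (hpre : Pre_detect_owner_type_py m) :
    m.foldl stepB none =
      specB (candB m "[Owner Type]") (candB m "[Grantor Type]") (candB m "[Grantee Type]") := by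
  induction m with
  | nil => rfl
  | cons hd tl ih =>
    obtain ⟨h0, h1, h2⟩ := hpre
    simp only [List.map_cons] at h0 h1 h2
    have hpre' : Pre_detect_owner_type_py tl := by
      refine ⟨?_, ?_, ?_⟩ <;>
        · simp only [List.count_cons] at * <;> omega
    have ihtl := ih hpre'
    simp only [List.foldl_cons]
    rw [foldl_stepB_merge, ihtl]
    obtain ⟨a, v⟩ := hd
    by_cases e0 : a = "[Owner Type]"
    · subst e0
      have hm : "[Owner Type]" ∉ tl.map Prod.fst := by
        intro hmem
        rw [List.count_cons_self] at h0
        have := List.count_pos_iff.mpr hmem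
        omega
      have cc : candB tl "[Owner Type]" = none := candB_none_of_not_mem _ _ hm
      have hc : candB (("[Owner Type]", v) :: tl) "[Owner Type]" =
          (if PySem.Str.strip v ≠ "" then some (PySem.Str.strip v) else none) := by
        simp [candB, PySem.Dict.get?_mk_cons]
      rw [hc,
        candB_cons_ne _ tl "[Grantor Type]" (by simp),
        candB_cons_ne _ tl "[Grantee Type]" (by simp)]
      have hstep : stepB none ("[Owner Type]", v) =
          (if PySem.Str.strip v ≠ "" then some ((0 : Int), PySem.Str.strip v) else none) := by
        simp [stepB, priorityB, PySem.Dict.get?_mk_cons]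
      rw [hstep]
      by_cases hraw : PySem.Str.strip v = "" <;>
        cases hg1 : candB tl "[Grantor Type]" <;> cases hg2 : candB tl "[Grantee Type]" <;>
        simp [hraw, cc, hg1, hg2, specB, mergeB]
    · by_cases e1 : a = "[Grantor Type]"
      · subst e1
        have hm : "[Grantor Type]" ∉ tl.map Prod.fst := by
          intro hmem
          rw [List.count_cons_self] at h1
          have := List.count_pos_iff.mpr hmem
          omega
        have cc : candB tl "[Grantor Type]" = none := candB_none_of_not_mem _ _ hm
        have hc : candB (("[Grantor Type]", v) :: tl) "[Grantor Type]" =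
            (if PySem.Str.strip v ≠ "" then some (PySem.Str.strip v) else none) := by
          simp [candB, PySem.Dict.get?_mk_cons]
        rw [hc,
          candB_cons_ne _ tl "[Owner Type]" (by simp),
          candB_cons_ne _ tl "[Grantee Type]" (by simp)]
        have hstep : stepB none ("[Grantor Type]", v) =
            (if PySem.Str.strip v ≠ "" then some ((1 : Int), PySem.Str.strip v) else none) := by
          simp [stepB, priorityB, PySem.Dict.get?_mk_cons]
        rw [hstep]
        by_cases hraw : PySem.Str.strip v = "" <;>
          cases hg1 : candB tl "[Owner Type]" <;> cases hg2 : candB tl "[Grantee Type]" <;>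
          simp [hraw, cc, hg1, hg2, specB, mergeB]
      · by_cases e2 : a = "[Grantee Type]"
        · subst e2
          have hm : "[Grantee Type]" ∉ tl.map Prod.fst := by
            intro hmem
            rw [List.count_cons_self] at h2
            have := List.count_pos_iff.mpr hmem
            omega
          have cc : candB tl "[Grantee Type]" = none := candB_none_of_not_mem _ _ hm
          have hc : candB (("[Grantee Type]", v) :: tl) "[Grantee Type]" =
              (if PySem.Str.strip v ≠ "" then some (PySem.Str.strip v) else none) := by
            simp [candB, PySem.Dict.get?_mk_cons]
          rw [hc,
            candB_cons_ne _ tl "[Owner Type]" (by simp),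
            candB_cons_ne _ tl "[Grantor Type]" (by simp)]
          have hstep : stepB none ("[Grantee Type]", v) =
              (if PySem.Str.strip v ≠ "" then some ((2 : Int), PySem.Str.strip v) else none) := by
            simp [stepB, priorityB, PySem.Dict.get?_mk_cons]
          rw [hstep]
          by_cases hraw : PySem.Str.strip v = "" <;>
            cases hg1 : candB tl "[Owner Type]" <;> cases hg2 : candB tl "[Grantor Type]" <;>
            simp [hraw, cc, hg1, hg2, specB, mergeB]
        · have hstep : stepB none (a, v) = none := by
            simp only [stepB, priorityB, PySem.Dict.get?_mk_cons]
            simp [beq_eq_false_iff_ne, Ne.symm e0, Ne.symm e1, Ne.symm e2, PySem.Dict.get?]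
          rw [hstep,
            candB_cons_ne _ tl "[Owner Type]" e0,
            candB_cons_ne _ tl "[Grantor Type]" e1,
            candB_cons_ne _ tl "[Grantee Type]" e2]
          cases specB (candB tl "[Owner Type]") (candB tl "[Grantor Type]") (candB tl "[Grantee Type]") <;> rfl

-- the cascade computes exactly a lookup in the canonical table, defaulting to orig
theorem cascade_eq_table (t orig : String) :
    detectCascadeA t orig = canonicalB.getD t orig := by
  simp only [detectCascadeA]
  split_ifs with h1 h2 h3 h4 h5 h6
  · rcases h1 with rfl | rfl <;> rfl
  · rcases h2 with rfl | rfl | rfl <;> rfl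
  · rcases h3 with rfl | rfl <;> rfl
  · rcases h4 with rfl | rfl <;> rfl
  · rcases h5 with rfl | rfl <;> rfl
  · rcases h6 with rfl | rfl <;> rfl
  · obtain ⟨n1, n2⟩ := not_or.mp h1
    obtain ⟨n3, n45⟩ := not_or.mp h2
    obtain ⟨n4, n5⟩ := not_or.mp n45
    obtain ⟨n6, n7⟩ := not_or.mp h3
    obtain ⟨n8, n9⟩ := not_or.mp h4
    obtain ⟨n10, n11⟩ := not_or.mp h5
    obtain ⟨n12, n13⟩ := not_or.mp h6
    have e : ∀ x : String, ¬ t = x → (x == t) = false := fun x h => by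
      simp [beq_eq_false_iff_ne]; exact fun hh => h hh.symm
    simp only [canonicalB, PySem.Dict.getD, PySem.Dict.get?_mk_cons,
      e _ n1, e _ n2, e _ n3, e _ n4, e _ n5, e _ n6, e _ n7, e _ n8, e _ n9,
      e _ n10, e _ n11, e _ n12, e _ n13, Bool.false_eq_true, if_false]
    simp [PySem.Dict.get?]

set_option maxHeartbeats 1000000 in
theorem detect_owner_type_py_eq (mapping : List (String × String))
    (hpre : Pre_detect_owner_type_py mapping) :
    detect_owner_type_py mapping = detect_owner_type_py_alt mapping := by
  unfold detect_owner_type_py detect_owner_type_py_alt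
  rw [foldl_stepB_spec mapping hpre]
  unfold candB
  cases h0 : (PySem.Dict.mk mapping).get? "[Owner Type]" <;>
  cases h1 : (PySem.Dict.mk mapping).get? "[Grantor Type]" <;>
  cases h2 : (PySem.Dict.mk mapping).get? "[Grantee Type]" <;>
  simp only [detectLoopA, h0, h1, h2] <;>
  first
    | rfl
    | (split_ifs <;> simp_all [specB, cascade_eq_table])

-- ===== VERDICT (by name: the statement is the Claim_ definition above) =====
theorem detect_owner_type_py_spec : Claim_equal_detect_owner_type_py := by
  intro mapping _ hpre
  unfold Spec_detect_owner_type_py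
  exact detect_owner_type_py_eq mapping hpre
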